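-- pv_equiv track=rewrite | github.com/hrssurt/lintcode | lintcode/10  String Permutation II.py | stringPermutation2
-- ===== SOURCE A (Python) =====
-- def stringPermutation2(str):
--     def dfs(lst):
--         if not lst:
--             return [""]
--         elif len(lst) == 1:
--             return [lst]
--         else:
--             result = []
--             for i, e in enumerate(lst):
--                 if i >= 1 and lst[i] == lst[i-1]:
--                     continue
--                 rest = lst[:i] + lst[i+1:]
--                 permuations = dfs(rest)
--                 for p in permuations:
--                     result.append([e] + p)
--             return result
--     if not str:
--         return [""]
--     lst = sorted(str)
--     result = dfs(lst)
--     return ["".join(l) for l in result]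
-- ===== SOURCE B (Python) =====
-- def stringPermutation2(str):
--     n = len(str)
--     if n == 0:
--         return [""]
--     counts = {}
--     for c in str:
--         counts[c] = counts.get(c, 0) + 1
--     keys = sorted(counts)
--     result = []
--     prefix = []
--
--     def backtrack():
--         if len(prefix) == n:
--             result.append("".join(prefix))
--             return
--         for c in keys:
--             if counts[c]:
--                 counts[c] -= 1
--                 prefix.append(c)
--                 backtrack()
--                 prefix.pop()
--                 counts[c] += 1
--
--     backtrack()
--     return result
-- ===== Notes on version B (the rewrite author's own statement) =====
-- stated objective: faster
-- what changed: Replaces dfs that copies list slices and concatenates sublists at every node (O(n) list copying per recursive call across n branches) with in-place backtracking over a character-count dictionary and a shared prefix, emitting each permutation once complete.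
import Mathlib
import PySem

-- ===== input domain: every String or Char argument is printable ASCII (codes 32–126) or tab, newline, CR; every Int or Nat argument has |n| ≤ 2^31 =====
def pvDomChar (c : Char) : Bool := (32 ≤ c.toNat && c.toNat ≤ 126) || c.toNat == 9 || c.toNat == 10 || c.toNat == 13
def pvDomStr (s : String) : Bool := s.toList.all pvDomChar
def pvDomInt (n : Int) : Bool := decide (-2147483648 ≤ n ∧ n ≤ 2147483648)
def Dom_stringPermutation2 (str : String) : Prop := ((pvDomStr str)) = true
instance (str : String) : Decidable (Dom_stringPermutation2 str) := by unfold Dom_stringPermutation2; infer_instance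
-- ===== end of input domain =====

-- B replaces A's slice-copying dfs by count-based backtracking with a shared pre (objective: faster).

-- ===== PORT A =====
-- dfs(lst); the Nat fuel only makes the recursion structural (lst.length at the top
-- is always enough: every recursive call drops one element), it changes no value.
def dfsA : Nat → List Char → List (List Char)
  | 0, _ => []
  | fuel+1, lst =>
    if lst = [] then [[]]                              -- if not lst: return [""]
    else if lst.length = 1 then [lst]                  -- elif len(lst) == 1: return [lst]
    else
      (PySem.List.enumerate lst).foldl                 -- for i, e in enumerate(lst)
        (fun result ie =>
          if 1 ≤ ie.1 ∧ PySem.List.pyGet? lst ie.1 = PySem.List.pyGet? lst (ie.1 - 1) then result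
          else result ++ (dfsA fuel (PySem.List.slice lst none (some ie.1) ++ PySem.List.slice lst (some (ie.1 + 1)) none)).map (fun p => ie.2 :: p))
        []

def stringPermutation2 (str : String) : List String :=
  if str.toList = [] then [""]                         -- if not str: return [""]
  else
    let lst := PySem.List.sorted str.toList (fun c => c) false
    let result := dfsA lst.length lst
    result.map (fun l => String.ofList l)                  -- ["".join(l) for l in result]

-- ===== PORT B =====
-- backtrack(); the Nat fuel only makes the recursion structural (n+1 at the top is
-- always enough: each recursive call lengthens pre by one), it changes no value.
-- Python's in-place mutate/undo of counts and pre is ported by passing the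
-- modified copies down and continuing the loop with the originals.
def btB : Nat → Nat → List Char → PySem.Dict Char Int → List Char → List String → List String
  | 0, _, _, _, _, result => result
  | fuel+1, n, keys, counts, pre, result =>
    if pre.length = n then result ++ [String.ofList pre]   -- result.append("".join(pre))
    else
      keys.foldl (fun result c =>                            -- for c in keys
        if counts.getD c 0 ≠ 0 then                          -- if counts[c]:  (key always present)
          btB fuel n keys (counts.insert c (counts.getD c 0 - 1)) (pre ++ [c]) result
        else result) result

def stringPermutation2_alt (str : String) : List String :=
  let n := str.toList.length
  if n = 0 then [""]
  else
    let counts := str.toList.foldl (fun d c => d.insert c (d.getD c 0 + 1)) PySem.Dict.empty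
    let keys := PySem.List.sorted counts.keys (fun c => c) false   -- sorted(counts)
    btB (n + 1) n keys counts [] []

-- ===== PRECONDITION & SPEC =====
def Spec_stringPermutation2 (str : String) (out : List String) : Prop := out = stringPermutation2_alt str
instance (str : String) (out : List String) : Decidable (Spec_stringPermutation2 str out) := by unfold Spec_stringPermutation2; infer_instance

-- ===== CLAIM (what is proved, stated in full; the proofs are below) =====
def Claim_equal_stringPermutation2 : Prop := ∀ (str : String), Dom_stringPermutation2 str → Spec_stringPermutation2 str (stringPermutation2 str)

-- ===== LEMMAS AND PROOFS =====

-- the elements of l that differ from their immediate predecessor (p? seeds the predecessor)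
def uniqP : Option Char → List Char → List Char
  | _, [] => []
  | p?, c :: t => if p? = some c then uniqP (some c) t else c :: uniqP (some c) t

-- reference recursion both ports are reduced to: distinct permutations of l,
-- heads in uniqP order, each head followed by the permutations of l minus that head
def permsF : Nat → List Char → List (List Char)
  | 0, _ => [[]]
  | fuel+1, l =>
    if l = [] then [[]]
    else (uniqP none l).flatMap (fun c => (permsF fuel (l.erase c)).map (fun p => c :: p))

def permsN (l : List Char) : List (List Char) := permsF l.length l

-- the sorted multiset a key list + count dictionary represents
def expand (keys : List Char) (counts : PySem.Dict Char Int) : List Char :=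
  keys.flatMap (fun c => List.replicate ((counts.getD c 0)).toNat c)

theorem uniqP_mem {p? : Option Char} {l : List Char} {x : Char} (h : x ∈ uniqP p? l) : x ∈ l := by
  induction l generalizing p? with
  | nil => simp [uniqP] at h
  | cons c t ih =>
    simp only [uniqP] at h
    split at h
    · exact List.mem_cons_of_mem _ (ih h)
    · rcases List.mem_cons.mp h with h | h
      · exact h ▸ List.mem_cons_self
      · exact List.mem_cons_of_mem _ (ih h)

theorem permsN_nil : permsN [] = [[]] := rfl

theorem permsN_cons {l : List Char} (h : l ≠ []) :
    permsN l = (uniqP none l).flatMap (fun c => (permsN (l.erase c)).map (fun p => c :: p)) := by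
  obtain ⟨m, hm⟩ : ∃ m, l.length = m + 1 := by
    cases l with | nil => exact absurd rfl h | cons x t => exact ⟨t.length, rfl⟩
  unfold permsN
  rw [hm]
  simp only [permsF, h, if_false]
  refine List.flatMap_congr ?_
  intro c hc
  have hcl : c ∈ l := uniqP_mem hc
  rw [List.length_erase_of_mem hcl, hm]
  norm_num

-- ===== A-side =====

theorem pyA_prefix_not_mem {a t : List Char} {c : Char}
    (hs : (a ++ c :: t).Pairwise (· ≤ ·)) (hg : a.getLast? ≠ some c) : c ∉ a := by
  intro hc
  rcases List.eq_nil_or_concat a with h0 | ⟨a', d, h0⟩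
  · subst h0; simp at hc
  · have h0' : a = a' ++ [d] := by simpa using h0
    subst h0'
    have hd : d ≠ c := fun h => hg (by simp [h])
    have h1 : ∀ x ∈ a' ++ [d], ∀ y ∈ c :: t, x ≤ y := (List.pairwise_append.mp hs).2.2
    have hdc : d ≤ c := h1 d (by simp) c List.mem_cons_self
    have hca : c ∈ a' := by
      rcases List.mem_append.mp hc with h | h
      · exact h
      · exact absurd ((List.mem_singleton.mp h).symm) hd
    have h2 := (List.pairwise_append.mp ((List.pairwise_append.mp hs).1)).2.2
    have hcd : c ≤ d := h2 c hca d (by simp)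
    exact hd (le_antisymm hdc hcd)

theorem loopA (fuel : Nat) (lst : List Char) (hs : lst.Pairwise (· ≤ ·)) :
    ∀ (b a : List Char) (acc : List (List Char)), lst = a ++ b →
    (PySem.List.enumerate b (a.length : Int)).foldl
      (fun result ie =>
        if 1 ≤ ie.1 ∧ PySem.List.pyGet? lst ie.1 = PySem.List.pyGet? lst (ie.1 - 1) then result
        else result ++ (dfsA fuel (PySem.List.slice lst none (some ie.1) ++ PySem.List.slice lst (some (ie.1 + 1)) none)).map (fun p => ie.2 :: p))
      acc
    = acc ++ (uniqP a.getLast? b).flatMap (fun c => (dfsA fuel (lst.erase c)).map (fun p => c :: p)) := by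
  intro b
  induction b with
  | nil =>
    intro a acc _
    simp [PySem.List.enumerate_nil, uniqP]
  | cons c t ih =>
    intro a acc hsplit
    rw [PySem.List.enumerate_cons, List.foldl_cons]
    have hgetc : PySem.List.pyGet? lst ((a.length : Nat) : Int) = some c := by
      rw [hsplit]; exact PySem.List.pyGet?_append_length ..
    by_cases hg : a.getLast? = some c
    · -- skipped element: lst[i] == lst[i-1]
      obtain ⟨a', d, h0⟩ : ∃ L e, a = L ++ [e] := by
        rcases List.eq_nil_or_concat a with h0 | ⟨L, e, h0⟩
        · subst h0; simp at hg
        · exact ⟨L, e, by simpa using h0⟩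
      subst h0
      obtain rfl : c = d := by simpa using hg.symm
      have h1 : (((a' ++ [c]).length : Nat) : Int) - 1 = ((a'.length : Nat) : Int) := by
        simp
      have hgetp : PySem.List.pyGet? lst ((((a' ++ [c]).length : Nat) : Int) - 1) = some c := by
        rw [h1, hsplit, show a' ++ [c] ++ c :: t = a' ++ (c :: (c :: t)) by simp]
        exact PySem.List.pyGet?_append_length ..
      rw [if_pos ⟨by simp, by rw [hgetc, hgetp]⟩]
      have hstart : (((a' ++ [c]).length : Nat) : Int) + 1 = (((a' ++ [c] ++ [c]).length : Nat) : Int) := by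
        simp; ring
      rw [hstart, ih (a' ++ [c] ++ [c]) acc (by rw [hsplit]; simp)]
      simp [uniqP]
    · -- kept element: first occurrence of c
      have hcnot : c ∉ a := pyA_prefix_not_mem (hsplit ▸ hs) hg
      have hcond : ¬(1 ≤ ((a.length : Nat) : Int) ∧
          PySem.List.pyGet? lst ((a.length : Nat) : Int) = PySem.List.pyGet? lst (((a.length : Nat) : Int) - 1)) := by
        rcases List.eq_nil_or_concat a with h0 | ⟨a', d, h0⟩
        · subst h0; rintro ⟨hx, -⟩; norm_num at hx
        · have h0' : a = a' ++ [d] := by simpa using h0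
          subst h0'
          rintro ⟨-, h2⟩
          have hd : d ≠ c := fun hdc => hg (by simp [hdc])
          have h1 : (((a' ++ [d]).length : Nat) : Int) - 1 = ((a'.length : Nat) : Int) := by
            simp
          rw [hgetc, h1, hsplit, show a' ++ [d] ++ c :: t = a' ++ (d :: (c :: t)) by simp,
            PySem.List.pyGet?_append_length] at h2
          exact hd (by simpa using h2.symm)
      rw [if_neg hcond]
      have hslice : PySem.List.slice lst none (some ((a.length : Nat) : Int)) ++
          PySem.List.slice lst (some (((a.length : Nat) : Int) + 1)) none = a ++ t := by
        rw [show ((a.length : Nat) : Int) + 1 = ((a.length + 1 : Nat) : Int) by push_cast; ring,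
          PySem.List.slice_to_natCast, PySem.List.slice_from_natCast, hsplit]
        congr 1
        · exact List.take_left
        · rw [show a ++ c :: t = (a ++ [c]) ++ t by simp,
            show a.length + 1 = (a ++ [c]).length by simp, List.drop_left]
      rw [hslice]
      have herase : lst.erase c = a ++ t := by
        rw [hsplit, List.erase_append_right _ hcnot, List.erase_cons_head]
      have hstart : ((a.length : Nat) : Int) + 1 = (((a ++ [c]).length : Nat) : Int) := by
        simp
      rw [hstart, ih (a ++ [c]) (acc ++ (dfsA fuel (a ++ t)).map (fun p => c :: p)) (by rw [hsplit]; simp)]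
      simp only [uniqP, if_neg hg, List.flatMap_cons, List.getLast?_concat]
      simp [herase, List.append_assoc]

theorem dfsA_eq_permsN : ∀ (fuel : Nat) (l : List Char), l ≠ [] → l.length ≤ fuel →
    l.Pairwise (· ≤ ·) → dfsA fuel l = permsN l := by
  intro fuel
  induction fuel with
  | zero =>
    intro l hne hlen _
    cases l with
    | nil => exact absurd rfl hne
    | cons c t => simp at hlen
  | succ fuel ih =>
    intro l hne hlen hsort
    by_cases h1 : l.length = 1
    · obtain ⟨c, rfl⟩ : ∃ c, l = [c] := by
        cases l with
        | nil => exact absurd rfl hne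
        | cons c t =>
          cases t with
          | nil => exact ⟨c, rfl⟩
          | cons d u => simp at h1
      simp [dfsA, permsN, permsF, uniqP]
    · have h2 : 2 ≤ l.length := by
        rcases l with _ | ⟨c, _ | ⟨d, u⟩⟩
        · exact absurd rfl hne
        · exact absurd rfl h1
        · simp
      rw [dfsA, if_neg hne, if_neg h1]
      have hloop := loopA fuel l hsort l [] [] (by simp)
      simp only [List.length_nil, Nat.cast_zero, List.getLast?_nil, List.nil_append] at hloop
      rw [hloop]
      rw [permsN_cons hne]
      refine List.flatMap_congr ?_
      intro c hc
      have hcl : c ∈ l := uniqP_mem hc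
      have herlen : (l.erase c).length = l.length - 1 := List.length_erase_of_mem hcl
      have hern : l.erase c ≠ [] := by
        intro h; rw [h] at herlen; simp at herlen; omega
      rw [ih (l.erase c) hern (by omega) (hsort.sublist (List.erase_sublist ..))]

-- ===== B-side =====

theorem uniqP_replicate_self (c : Char) (r : List Char) :
    ∀ k, uniqP (some c) (List.replicate k c ++ r) = uniqP (some c) r := by
  intro k
  induction k with
  | zero => rfl
  | succ k ih => simpa [List.replicate_succ, uniqP] using ih

theorem uniqP_replicate_new {p? : Option Char} {c : Char} (h : p? ≠ some c) (r : List Char) :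
    ∀ {k}, 0 < k → uniqP p? (List.replicate k c ++ r) = c :: uniqP (some c) r := by
  intro k hk
  cases k with
  | zero => omega
  | succ k => simp [List.replicate_succ, uniqP, h, uniqP_replicate_self]

theorem expand_congr {keys : List Char} {counts counts' : PySem.Dict Char Int}
    (h : ∀ c ∈ keys, counts.getD c 0 = counts'.getD c 0) : expand keys counts = expand keys counts' := by
  unfold expand
  induction keys with
  | nil => rfl
  | cons k ks ih =>
    simp only [List.flatMap_cons]
    rw [h k List.mem_cons_self, ih (fun c hc => h c (List.mem_cons_of_mem _ hc))]

theorem uniqP_expand {counts : PySem.Dict Char Int} (hnn : ∀ c, 0 ≤ counts.getD c 0) :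
    ∀ (keys : List Char) (p? : Option Char), keys.Pairwise (· < ·) →
    (∀ d c, p? = some d → c ∈ keys → d < c) →
    uniqP p? (expand keys counts) = keys.filter (fun c => decide (counts.getD c 0 ≠ 0)) := by
  intro keys
  induction keys with
  | nil => intro p? _ _; simp [expand, uniqP]
  | cons k ks ih =>
    intro p? hpw hbd
    have hpw' := (List.pairwise_cons.mp hpw).2
    by_cases hz : counts.getD k 0 = 0
    · simp only [expand, List.flatMap_cons, hz, Int.toNat_zero, List.replicate_zero, List.nil_append]
      rw [show (ks.flatMap fun c => List.replicate (counts.getD c 0).toNat c) = expand ks counts from rfl]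
      rw [ih p? hpw' (fun d c hd hc => hbd d c hd (List.mem_cons_of_mem _ hc))]
      simp [hz]
    · have hp : p? ≠ some k := by
        intro he
        exact absurd (hbd k k he List.mem_cons_self) (lt_irrefl k)
      have hkpos : 0 < (counts.getD k 0).toNat := by have := hnn k; omega
      simp only [expand, List.flatMap_cons]
      rw [show (ks.flatMap fun c => List.replicate (counts.getD c 0).toNat c) = expand ks counts from rfl]
      rw [uniqP_replicate_new hp _ hkpos]
      rw [ih (some k) hpw' (fun d c hd hc => by
        rw [Option.some_inj] at hd; subst hd; exact (List.pairwise_cons.mp hpw).1 c hc)]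
      simp [hz]

theorem expand_erase {counts : PySem.Dict Char Int} (hnn : ∀ c, 0 ≤ counts.getD c 0) {c : Char} :
    ∀ {keys : List Char}, keys.Nodup → c ∈ keys → counts.getD c 0 ≠ 0 →
    (expand keys counts).erase c = expand keys (counts.insert c (counts.getD c 0 - 1)) := by
  intro keys
  induction keys with
  | nil => intro _ hc _; simp at hc
  | cons k ks ih =>
    intro hnd hc hz
    by_cases hkc : k = c
    · subst hkc
      simp only [expand, List.flatMap_cons]
      obtain ⟨m, hm⟩ : ∃ m, (counts.getD k 0).toNat = m + 1 := by
        have := hnn k; exact ⟨(counts.getD k 0).toNat - 1, by omega⟩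
      rw [hm, List.replicate_succ, List.cons_append, List.erase_cons_head]
      have h1 : ((counts.insert k (counts.getD k 0 - 1)).getD k 0).toNat = m := by
        rw [PySem.Dict.getD_insert_self]; have := hnn k; omega
      rw [h1]
      congr 1
      exact expand_congr (fun c' hc' => by
        rw [PySem.Dict.getD_insert_of_ne counts _ _
          (fun h : c' = k => (List.nodup_cons.mp hnd).1 (h ▸ hc'))])
    · have hcks : c ∈ ks := by
        rcases List.mem_cons.mp hc with h | h
        · exact absurd h.symm hkc
        · exact h
      simp only [expand, List.flatMap_cons]
      rw [List.erase_append_right _ (fun h => hkc ((List.mem_replicate.mp h).2.symm))]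
      rw [show (ks.flatMap fun c => List.replicate (counts.getD c 0).toNat c) = expand ks counts from rfl,
        ih (List.nodup_cons.mp hnd).2 hcks hz]
      rw [PySem.Dict.getD_insert_of_ne counts _ _ hkc]
      rfl

theorem count_expand (f : Char → Nat) (a : Char) :
    ∀ {ks : List Char}, ks.Nodup →
    (ks.flatMap (fun c => List.replicate (f c) c)).count a = if a ∈ ks then f a else 0 := by
  intro ks hnd
  induction ks with
  | nil => simp
  | cons k ks ih =>
    have hnd' := (List.nodup_cons.mp hnd).2
    have hk := (List.nodup_cons.mp hnd).1
    simp only [List.flatMap_cons, List.count_append, ih hnd', List.count_replicate]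
    by_cases hak : a = k
    · subst hak; simp [hk]
    · simp [hak, Ne.symm hak, List.mem_cons]

theorem pairwise_expand (f : Char → Nat) :
    ∀ {ks : List Char}, ks.Pairwise (· < ·) →
    (ks.flatMap (fun c => List.replicate (f c) c)).Pairwise (· ≤ ·) := by
  intro ks hpw
  induction ks with
  | nil => simp
  | cons k ks ih =>
    simp only [List.flatMap_cons]
    rw [List.pairwise_append]
    refine ⟨List.pairwise_replicate.mpr (by simp), ih (List.pairwise_cons.mp hpw).2, ?_⟩
    intro x hx y hy
    obtain rfl := (List.mem_replicate.mp hx).2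
    obtain ⟨k', hk', hy'⟩ := List.mem_flatMap.mp hy
    obtain rfl := (List.mem_replicate.mp hy').2
    exact le_of_lt ((List.pairwise_cons.mp hpw).1 _ hk')

theorem btB_eq_permsN : ∀ (fuel n : Nat) (keys : List Char) (counts : PySem.Dict Char Int)
    (pre : List Char) (acc : List String),
    keys.Pairwise (· < ·) → (∀ c, 0 ≤ counts.getD c 0) →
    n = pre.length + (expand keys counts).length →
    (expand keys counts).length < fuel →
    btB fuel n keys counts pre acc
      = acc ++ (permsN (expand keys counts)).map (fun p => String.ofList (pre ++ p)) := by
  intro fuel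
  induction fuel with
  | zero => intro n keys counts pre acc _ _ _ hf; omega
  | succ fuel ih =>
    intro n keys counts pre acc hpw hnn hn hfuel
    rw [btB]
    by_cases hpn : pre.length = n
    · rw [if_pos hpn]
      have hnil : expand keys counts = [] := List.eq_nil_of_length_eq_zero (by omega)
      rw [hnil]
      simp [permsN_nil]
    · rw [if_neg hpn]
      have hne : expand keys counts ≠ [] := by
        intro h
        rw [h] at hn
        simp at hn
        omega
      have hnodup : keys.Nodup := hpw.imp (fun h => ne_of_lt h)
      have hfold : ∀ (ks : List Char) (acc : List String), (∀ c ∈ ks, c ∈ keys) →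
          ks.foldl (fun result c => if counts.getD c 0 ≠ 0 then
              btB fuel n keys (counts.insert c (counts.getD c 0 - 1)) (pre ++ [c]) result
            else result) acc
          = acc ++ (ks.filter (fun c => decide (counts.getD c 0 ≠ 0))).flatMap
              (fun c => (permsN ((expand keys counts).erase c)).map (fun p => String.ofList (pre ++ c :: p))) := by
        intro ks
        induction ks with
        | nil => intro acc _; simp
        | cons c cs ihks =>
          intro acc hmem
          rw [List.foldl_cons]
          by_cases hz : counts.getD c 0 = 0
          · rw [if_neg (by simp [hz])]
            rw [ihks acc (fun d hd => hmem d (List.mem_cons_of_mem _ hd))]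
            simp [hz]
          · rw [if_pos hz]
            have hck : c ∈ keys := hmem c List.mem_cons_self
            have herase : (expand keys counts).erase c
                = expand keys (counts.insert c (counts.getD c 0 - 1)) :=
              expand_erase hnn hnodup hck hz
            have hcmem : c ∈ expand keys counts := by
              refine List.mem_flatMap.mpr ⟨c, hck, ?_⟩
              refine List.mem_replicate.mpr ⟨by have := hnn c; omega, rfl⟩
            have hlener : ((expand keys counts).erase c).length + 1 = (expand keys counts).length := by
              rw [List.length_erase_of_mem hcmem]
              have : 0 < (expand keys counts).length := List.length_pos_iff.mpr hne
              omega
            have hnn' : ∀ d, 0 ≤ (counts.insert c (counts.getD c 0 - 1)).getD d 0 := by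
              intro d
              rw [PySem.Dict.getD_insert]
              split
              · have := hnn c; omega
              · exact hnn d
            have hIHb := ih n keys (counts.insert c (counts.getD c 0 - 1)) (pre ++ [c]) acc
              hpw hnn' (by rw [← herase]; simp; omega) (by rw [← herase]; omega)
            rw [hIHb, ihks _ (fun d hd => hmem d (List.mem_cons_of_mem _ hd))]
            rw [← herase]
            simp [hz, List.append_assoc]
      rw [hfold keys acc (fun c h => h)]
      rw [permsN_cons hne, uniqP_expand hnn keys none hpw (by simp)]
      congr 1
      rw [List.map_flatMap]
      refine List.flatMap_congr ?_
      intro c _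
      simp

-- ===== VERDICT (by name: the statement is the Claim_ definition above) =====
theorem expand_keys_counter (s : List Char) :
    expand (PySem.List.sorted (PySem.Set.ofList s) (fun c => c) false) (PySem.Dict.counter s)
      = PySem.List.sorted s (fun c => c) false := by
  set keys := PySem.List.sorted (PySem.Set.ofList s) (fun c => c) false with hkeys
  have hpw : keys.Pairwise (· < ·) := PySem.List.sorted_ofList_pairwise_lt s
  have hnodup : keys.Nodup := hpw.imp (fun h => ne_of_lt h)
  have hmemkeys : ∀ a : Char, a ∈ keys ↔ a ∈ s := by
    intro a
    rw [hkeys, PySem.List.mem_sorted, PySem.Set.mem_ofList]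
  have hexp : expand keys (PySem.Dict.counter s)
      = keys.flatMap (fun c => List.replicate (s.count c) c) := by
    unfold expand
    exact List.flatMap_congr (fun c _ => by rw [PySem.Dict.getD_counter]; simp)
  rw [hexp]
  refine (PySem.List.sorted_id_eq_of_perm_of_pairwise s _ ?_ ?_).symm
  · refine List.perm_iff_count.mpr (fun a => ?_)
    rw [count_expand (fun c => s.count c) a hnodup]
    by_cases ha : a ∈ s
    · simp [(hmemkeys a).mpr ha]
    · simp [List.count_eq_zero.mpr ha]
  · exact pairwise_expand _ hpw

theorem stringPermutation2_spec : Claim_equal_stringPermutation2 := by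
  unfold Claim_equal_stringPermutation2 Spec_stringPermutation2
  intro str _
  by_cases h0 : str.toList = []
  · simp [stringPermutation2, stringPermutation2_alt, h0]
  · have hlen0 : str.toList.length ≠ 0 := fun h => h0 (List.eq_nil_of_length_eq_zero h)
    have hsortA : (PySem.List.sorted str.toList (fun c => c) false).Pairwise (· ≤ ·) :=
      PySem.List.sorted_pairwise str.toList (fun c => c)
    have hlstne : PySem.List.sorted str.toList (fun c => c) false ≠ [] := by
      rw [Ne, PySem.List.sorted_eq_nil_iff]; exact h0
    have hA : dfsA (PySem.List.sorted str.toList (fun c => c) false).length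
        (PySem.List.sorted str.toList (fun c => c) false)
        = permsN (PySem.List.sorted str.toList (fun c => c) false) :=
      dfsA_eq_permsN _ _ hlstne le_rfl hsortA
    have hexp := expand_keys_counter str.toList
    have hlenexp : (expand (PySem.List.sorted (PySem.Set.ofList str.toList) (fun c => c) false)
        (PySem.Dict.counter str.toList)).length = str.toList.length := by
      rw [hexp, PySem.List.length_sorted]
    have hB := btB_eq_permsN (str.toList.length + 1) str.toList.length
      (PySem.List.sorted (PySem.Set.ofList str.toList) (fun c => c) false)
      (PySem.Dict.counter str.toList) [] []
      (PySem.List.sorted_ofList_pairwise_lt str.toList)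
      (fun c => by rw [PySem.Dict.getD_counter]; positivity)
      (by rw [hlenexp]; simp) (by rw [hlenexp]; omega)
    rw [hexp] at hB
    simp only [stringPermutation2, stringPermutation2_alt, if_neg h0, if_neg hlen0,
      PySem.Dict.foldl_insert_getD_add_one_eq_counter, PySem.Dict.keys_counter]
    rw [hA, hB]
    simp
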